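-- pv_equiv track=rewrite | github.com/sky-butterfly/coding-test | 프로그래머스/Level_2/요격 시스템.py | solution
-- ===== SOURCE A (Python) =====
-- def solution(targets):
--     answer = 0
--
--     targets.sort(key=lambda x: x[0])
--
--     arr = []
--     for t in targets:
--
--         s = t[0]
--         e = t[1]
--
--         check = False
--         for i in range(len(arr)-1, -1 , -1):
--             a = arr[i]
--
--             if a[1] > s :
--                 check = True
--                 arr[i] = [s, min(e, a[1])]
--                 break
--
--         if check == False:
--             arr.append([s, e])
--
--     answer = len(arr)
--
--     return answer
-- ===== SOURCE B (Python) =====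
-- def solution(targets):
--     # One-pass greedy over starts: only the most recent group can still overlap,
--     # so keep a single running (count, current group end) instead of A's arr list.
--     cnt = 0
--     end = None
--     for t in sorted(targets, key=lambda x: x[0]):
--         s, e = t[0], t[1]
--         if end is None or end <= s:
--             cnt += 1
--             end = e
--         else:
--             end = min(end, e)
--     return cnt
-- ===== Notes on version B (the rewrite author's own statement) =====
-- stated objective: simpler
-- what changed: A keeps a list of interceptor groups and rescans it backwards for every target; B exploits that after sorting by start only the most recent group can still overlap, so it keeps just a counter and the current group's end in one pass.
import Mathlib
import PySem

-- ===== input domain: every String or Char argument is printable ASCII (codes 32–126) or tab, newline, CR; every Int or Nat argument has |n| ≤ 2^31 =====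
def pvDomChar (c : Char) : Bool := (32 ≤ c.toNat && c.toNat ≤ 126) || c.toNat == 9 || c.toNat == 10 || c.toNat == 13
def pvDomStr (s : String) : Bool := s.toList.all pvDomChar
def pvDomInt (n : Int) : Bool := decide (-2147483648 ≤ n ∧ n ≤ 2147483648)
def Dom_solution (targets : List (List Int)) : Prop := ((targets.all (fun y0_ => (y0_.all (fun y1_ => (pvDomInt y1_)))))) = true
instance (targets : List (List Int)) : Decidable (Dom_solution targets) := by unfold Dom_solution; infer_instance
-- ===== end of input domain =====

-- B changes the data structure, not the answer: one pass over the start-sorted targets with a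
-- counter and the current group end, instead of A's list of groups with a backward rescan.
-- A sorts `targets` in place (side effect on the argument); the equivalence here is about the
-- return value only — B does not mutate its argument.

-- shared accessors for t[0] and t[1] (both Pythons read the pair this way)
def pvStart (t : List Int) : Int := (PySem.List.pyGet? t 0).getD 0
def pvEnd (t : List Int) : Int := (PySem.List.pyGet? t 1).getD 0

-- ===== PORT A =====
-- the backward scan `for i in range(len(arr)-1, -1, -1)` with break: the LAST index whose
-- end exceeds s is updated; none found = append.  Recursion tries the later elements first.
def aUpdate (s e : Int) : List (List Int) → Option (List (List Int))
  | [] => none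
  | a :: rest =>
    match aUpdate s e rest with
    | some rest' => some (a :: rest')
    | none => if pvEnd a > s then some ([s, min e (pvEnd a)] :: rest) else none

def aStep (arr : List (List Int)) (s e : Int) : List (List Int) :=
  match aUpdate s e arr with
  | some arr' => arr'
  | none => arr ++ [[s, e]]

def solution (targets : List (List Int)) : Int :=
  let ts := PySem.List.sorted targets pvStart false
  let arr := ts.foldl (fun arr t => aStep arr (pvStart t) (pvEnd t)) []
  (arr.length : Int)

-- ===== PORT B =====
def bStep (st : Int × Option Int) (t : List Int) : Int × Option Int :=
  match st.2 with
  | none => (st.1 + 1, some (pvEnd t))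
  | some en =>
    if en ≤ pvStart t then (st.1 + 1, some (pvEnd t)) else (st.1, some (min en (pvEnd t)))

def solution_alt (targets : List (List Int)) : Int :=
  ((PySem.List.sorted targets pvStart false).foldl bStep ((0 : Int), (none : Option Int))).1

-- ===== PRECONDITION & SPEC =====
-- Pre_ excludes exactly the inputs on which Python A raises IndexError: a target sublist with
-- fewer than two elements (t[0]/t[1], and the sort key on an empty sublist).
def Pre_solution (targets : List (List Int)) : Prop := ∀ t ∈ targets, 2 ≤ t.length
instance (targets : List (List Int)) : Decidable (Pre_solution targets) := by
  unfold Pre_solution; infer_instance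
def pvWitness_solution : List (List Int) := [[4, 5], [4, 8], [10, 14], [11, 13], [5, 12], [3, 7], [1, 4]]

def Spec_solution (targets : List (List Int)) (out : Int) : Prop := out = solution_alt targets
instance (targets : List (List Int)) (out : Int) : Decidable (Spec_solution targets out) := by
  unfold Spec_solution; infer_instance

-- ===== CLAIM (what is proved, stated in full; the proofs are below) =====
def Claim_equal_solution : Prop :=
  ∀ (targets : List (List Int)), Dom_solution targets → Pre_solution targets →
    Spec_solution targets (solution targets)

-- ===== LEMMAS AND PROOFS =====

theorem pvEnd_pair (x y : Int) : pvEnd [x, y] = y := rfl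

-- a backward scan over a list all of whose ends are ≤ s finds nothing
theorem aUpdate_none (s e : Int) (arr : List (List Int)) (h : ∀ x ∈ arr, pvEnd x ≤ s) :
    aUpdate s e arr = none := by
  induction arr with
  | nil => rfl
  | cons a rest ih =>
    have ha : pvEnd a ≤ s := h a (by simp)
    have := ih (fun x hx => h x (by simp [hx]))
    simp [aUpdate, this, not_lt.mpr ha]

-- if only the last element's end exceeds s, the backward scan updates exactly that element
theorem aUpdate_last (s e : Int) (pre : List (List Int)) (a : List Int)
    (hpre : ∀ x ∈ pre, pvEnd x ≤ s) (ha : s < pvEnd a) :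
    aUpdate s e (pre ++ [a]) = some (pre ++ [[s, min e (pvEnd a)]]) := by
  induction pre with
  | nil => simp [aUpdate, ha]
  | cons p pre ih =>
    have := ih (fun x hx => hpre x (by simp [hx]))
    simp [aUpdate, this]

-- the loop invariant: A's arr is pre ++ [a] with every end in pre ≤ b, all remaining starts
-- ≥ b; then A's group count tracks B's scalar state (pre.length + 1, end of a).
theorem loop_eq (ts : List (List Int)) :
    ∀ (pre : List (List Int)) (a : List Int) (b : Int),
      (∀ t ∈ ts, b ≤ pvStart t) →
      ts.Pairwise (fun x y => pvStart x ≤ pvStart y) →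
      (∀ x ∈ pre, pvEnd x ≤ b) →
      ((ts.foldl (fun arr t => aStep arr (pvStart t) (pvEnd t)) (pre ++ [a])).length : Int)
        = (ts.foldl bStep (((pre.length : Int) + 1), some (pvEnd a))).1 := by
  induction ts with
  | nil => intro pre a b _ _ _; simp
  | cons t ts ih =>
    intro pre a b hb hpair hpre
    have hbs : b ≤ pvStart t := hb t (by simp)
    have hpre' : ∀ x ∈ pre, pvEnd x ≤ pvStart t := fun x hx => le_trans (hpre x hx) hbs
    have hb' : ∀ u ∈ ts, pvStart t ≤ pvStart u := (List.pairwise_cons.mp hpair).1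
    have hpair' := (List.pairwise_cons.mp hpair).2
    by_cases h : pvEnd a ≤ pvStart t
    · -- no overlap: A appends a new group, B counts one more
      have hall : ∀ x ∈ pre ++ [a], pvEnd x ≤ pvStart t := by
        intro x hx; rcases List.mem_append.mp hx with hx | hx
        · exact hpre' x hx
        · simp at hx; subst hx; exact h
      have hA : aStep (pre ++ [a]) (pvStart t) (pvEnd t) = (pre ++ [a]) ++ [[pvStart t, pvEnd t]] := by
        simp [aStep, aUpdate_none _ _ _ hall]
      have := ih (pre ++ [a]) [pvStart t, pvEnd t] (pvStart t) hb' hpair'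
        (fun x hx => hall x hx)
      simp only [List.foldl_cons, hA, bStep, h, if_pos, pvEnd_pair] at this ⊢
      rw [this]; congr 2; simp
    · -- overlap with the last group: A shrinks it in place, B shrinks its scalar end
      rw [not_le] at h
      have hA : aStep (pre ++ [a]) (pvStart t) (pvEnd t)
          = pre ++ [[pvStart t, min (pvEnd t) (pvEnd a)]] := by
        simp [aStep, aUpdate_last _ _ _ _ hpre' h]
      have := ih pre [pvStart t, min (pvEnd t) (pvEnd a)] (pvStart t) hb' hpair' hpre'
      simp only [List.foldl_cons, hA, bStep, not_le.mpr h, pvEnd_pair] at this ⊢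
      rw [min_comm (pvEnd a) (pvEnd t)]
      exact this

theorem loop_eq_main (ts : List (List Int))
    (hpair : ts.Pairwise (fun x y => pvStart x ≤ pvStart y)) :
    ((ts.foldl (fun arr t => aStep arr (pvStart t) (pvEnd t)) []).length : Int)
      = (ts.foldl bStep ((0 : Int), (none : Option Int))).1 := by
  cases ts with
  | nil => simp
  | cons t ts =>
    have hb' := (List.pairwise_cons.mp hpair).1
    have hpair' := (List.pairwise_cons.mp hpair).2
    have h1 : aStep [] (pvStart t) (pvEnd t) = [] ++ [[pvStart t, pvEnd t]] := rfl
    have := loop_eq ts [] [pvStart t, pvEnd t] (pvStart t) hb' hpair' (by simp)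
    simpa [h1, bStep, pvEnd_pair] using this

-- ===== VERDICT (by name: the statement is the Claim_ definition above) =====
theorem solution_spec : Claim_equal_solution := by
  intro targets _ _
  unfold Spec_solution solution solution_alt
  exact loop_eq_main _ (PySem.List.sorted_pairwise targets pvStart)
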